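-- pv_equiv track=rewrite | github.com/Kereat/toxic_classification | mail_preprocessing_updated.py | is_mail_addr
-- ===== SOURCE A (Python) =====
-- def is_mail_addr(text_list:list):
--     at, mail = False, False
--     for word in text_list:
--         if '@' in word and '.' in word:
--             return '!mail_addr'
--         if '@' in word:
--             at = True
--         if 'mail' in word:
--             mail = True
--     if at+mail == 2:
--         return '!mail_addr'
--     if at+mail == 1:
--         return '?mail_addr'
-- ===== SOURCE B (Python) =====
-- def is_mail_addr(text_list: list):
--     if any('@' in w and '.' in w for w in text_list):
--         return '!mail_addr'
--     at = any('@' in w for w in text_list)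
--     mail = any('mail' in w for w in text_list)
--     if at + mail == 2:
--         return '!mail_addr'
--     if at + mail == 1:
--         return '?mail_addr'
-- ===== Notes on version B (the rewrite author's own statement) =====
-- stated objective: simpler
-- what changed: Replaces the single fused loop that threads two mutable flags with an early-return check via any() over the full list plus two independent declarative any() scans, then the same flag-count branching.
import Mathlib
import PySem

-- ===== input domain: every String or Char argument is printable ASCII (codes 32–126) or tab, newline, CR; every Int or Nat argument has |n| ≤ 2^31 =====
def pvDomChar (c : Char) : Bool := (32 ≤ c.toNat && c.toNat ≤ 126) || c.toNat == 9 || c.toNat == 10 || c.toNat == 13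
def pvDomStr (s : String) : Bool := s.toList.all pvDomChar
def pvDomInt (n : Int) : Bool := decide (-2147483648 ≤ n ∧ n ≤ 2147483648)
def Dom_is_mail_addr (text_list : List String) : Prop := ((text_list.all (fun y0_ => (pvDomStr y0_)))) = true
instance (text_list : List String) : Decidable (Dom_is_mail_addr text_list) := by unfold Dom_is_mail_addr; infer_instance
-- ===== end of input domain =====

-- B replaces A's fused flag-threading loop with an early-return any() check plus two independent any() scans (objective: simpler).

-- ===== PORT A =====
-- the loop, threading the two mutable flags; the trailing if-chain runs when the loop finishes
def isMailLoopA : List String → Bool → Bool → Option String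
  | [], at_, mail =>
    if at_.toNat + mail.toNat = 2 then some "!mail_addr"
    else if at_.toNat + mail.toNat = 1 then some "?mail_addr"
    else none
  | word :: rest, at_, mail =>
    if PySem.Str.isIn "@" word && PySem.Str.isIn "." word then some "!mail_addr"
    else
      let at_ := if PySem.Str.isIn "@" word then true else at_
      let mail := if PySem.Str.isIn "mail" word then true else mail
      isMailLoopA rest at_ mail

def is_mail_addr (text_list : List String) : Option String :=
  isMailLoopA text_list false false

-- ===== PORT B =====
def is_mail_addr_alt (text_list : List String) : Option String :=
  if text_list.any (fun w => PySem.Str.isIn "@" w && PySem.Str.isIn "." w) then some "!mail_addr"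
  else
    let at_ := text_list.any (fun w => PySem.Str.isIn "@" w)
    let mail := text_list.any (fun w => PySem.Str.isIn "mail" w)
    if at_.toNat + mail.toNat = 2 then some "!mail_addr"
    else if at_.toNat + mail.toNat = 1 then some "?mail_addr"
    else none

-- ===== PRECONDITION & SPEC =====
def Spec_is_mail_addr (text_list : List String) (out : Option String) : Prop := out = is_mail_addr_alt text_list
instance (text_list : List String) (out : Option String) : Decidable (Spec_is_mail_addr text_list out) := by unfold Spec_is_mail_addr; infer_instance

-- ===== CLAIM (what is proved, stated in full; the proofs are below) =====
def Claim_equal_is_mail_addr : Prop := ∀ (text_list : List String), Dom_is_mail_addr text_list → Spec_is_mail_addr text_list (is_mail_addr text_list)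

-- ===== LEMMAS AND PROOFS =====
lemma isMailLoopA_eq (xs : List String) (a m : Bool) :
    isMailLoopA xs a m =
      if xs.any (fun w => PySem.Str.isIn "@" w && PySem.Str.isIn "." w) then some "!mail_addr"
      else
        let a' := a || xs.any (fun w => PySem.Str.isIn "@" w)
        let m' := m || xs.any (fun w => PySem.Str.isIn "mail" w)
        if a'.toNat + m'.toNat = 2 then some "!mail_addr"
        else if a'.toNat + m'.toNat = 1 then some "?mail_addr"
        else none := by
  induction xs generalizing a m with
  | nil => simp only [List.any_nil, isMailLoopA, Bool.or_false, Bool.false_eq_true, if_false]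
  | cons w rest ih =>
    simp only [isMailLoopA, List.any_cons, ih]
    rcases Bool.eq_false_or_eq_true (PySem.Str.isIn "@" w) with h1 | h1 <;>
      rcases Bool.eq_false_or_eq_true (PySem.Str.isIn "." w) with h2 | h2 <;>
      rcases Bool.eq_false_or_eq_true (PySem.Str.isIn "mail" w) with h3 | h3 <;>
      simp only [h1, h2, h3, Bool.and_false, Bool.and_true, Bool.false_or, Bool.true_or,
        Bool.or_true, Bool.false_eq_true, if_false, if_true, Bool.toNat_true]

-- ===== VERDICT (by name: the statement is the Claim_ definition above) =====
theorem is_mail_addr_spec : Claim_equal_is_mail_addr := by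
  intro xs _
  unfold Spec_is_mail_addr is_mail_addr is_mail_addr_alt
  rw [isMailLoopA_eq]
  simp only [Bool.false_or]
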